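-- pv_equiv track=rewrite | github.com/ttinies/sc2common | commonUtilFuncs.py | convertToMapPic
-- ===== SOURCE A (Python) =====
-- def convertToMapPic(byteString, mapWidth):
--     """convert a bytestring into a 2D row x column array, representing an existing map of fog-of-war, creep, etc."""
--     data = []
--     line = ""
--     for idx,char in enumerate(byteString):
--         line += str(ord(char))
--         if ((idx+1)%mapWidth)==0:
--             data.append(line)
--             line = ""
--     return data
-- ===== SOURCE B (Python) =====
-- def convertToMapPic(byteString, mapWidth):
--     """convert a bytestring into a 2D row x column array, representing an existing map of fog-of-war, creep, etc."""
--     return ["".join(str(ord(c)) for c in byteString[i * mapWidth:(i + 1) * mapWidth])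
--             for i in range(len(byteString) // mapWidth)]
-- ===== Notes on version B (the rewrite author's own statement) =====
-- stated objective: idiomatic
-- what changed: Replaces A's flat scan with a running line accumulator and a per-character modulus test by one comprehension over row indices, building each complete row as ''.join(str(ord(c)) for c in a slice); Pre_ restricts to positive mapWidth, the natural domain: with mapWidth==0 A raises ZeroDivisionError on any non-empty input, and on negative mapWidth A's chunking by |mapWidth| is an artefact of Python's divisor-sign modulo.
-- outside the precondition, e.g. on convertToMapPic('ab', -2): A returns ['9798'], B returns []; on convertToMapPic('abc', 0): A raises ZeroDivisionError, B raises ZeroDivisionError; on convertToMapPic('', 0): A returns [], B raises ZeroDivisionError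
import Mathlib
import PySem

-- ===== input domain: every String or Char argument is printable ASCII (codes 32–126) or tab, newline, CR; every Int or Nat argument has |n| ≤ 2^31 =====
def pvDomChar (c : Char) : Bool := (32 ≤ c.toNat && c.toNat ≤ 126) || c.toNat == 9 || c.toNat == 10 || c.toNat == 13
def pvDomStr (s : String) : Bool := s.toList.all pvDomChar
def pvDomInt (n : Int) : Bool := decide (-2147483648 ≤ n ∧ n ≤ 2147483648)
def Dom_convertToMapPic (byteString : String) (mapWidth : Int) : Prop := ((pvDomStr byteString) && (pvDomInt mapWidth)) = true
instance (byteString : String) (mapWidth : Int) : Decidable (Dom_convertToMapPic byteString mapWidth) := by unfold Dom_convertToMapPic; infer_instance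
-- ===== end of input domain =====

-- B rebuilds the rows by index (one slice + one join per complete row) instead of A's running
-- accumulator with a per-character modulus test; same cost, a more idiomatic decomposition.

-- ===== PORT A =====
-- line += str(ord(char)) is ported on the code-point list (PySem.Int.toChars = str(n)); mod? is Python's
-- '%' (none exactly where Python raises ZeroDivisionError; that input is excluded by Pre_ below).
def convertToMapPic (byteString : String) (mapWidth : Int) : List String :=
  ((PySem.List.enumerate byteString.toList 0).foldl
      (fun (st : List String × List Char) (p : Int × Char) =>
        let line := st.2 ++ PySem.Int.toChars ((p.2.toNat : Int))
        if PySem.Int.mod? (p.1 + 1) mapWidth = some 0 then (st.1 ++ [String.ofList line], [])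
        else (st.1, line))
      ([], [])).1

-- ===== PORT B =====
-- range(len(byteString)//mapWidth) → pyRange over floordiv; each row is
-- ''.join(str(ord(c)) for c in byteString[i*mapWidth:(i+1)*mapWidth]) (join = PySem.Chars.join).
def convertToMapPic_alt (byteString : String) (mapWidth : Int) : List String :=
  (PySem.List.pyRange 0 (PySem.Int.floordiv (byteString.toList.length : Int) mapWidth) 1).map
    (fun i =>
      String.ofList (PySem.Chars.join []
        ((PySem.List.slice byteString.toList (some (i * mapWidth)) (some ((i + 1) * mapWidth))).map
          (fun c => PySem.Int.toChars ((c.toNat : Int))))))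

-- ===== PRECONDITION & SPEC =====
-- Pre_ restricts to positive mapWidth, the natural domain of a row width: with mapWidth == 0 A raises
-- ZeroDivisionError on any non-empty input (and B's '// mapWidth' raises on every input), and on
-- negative mapWidth A's chunking by |mapWidth| is an artefact of Python's divisor-sign modulo.
def Pre_convertToMapPic (byteString : String) (mapWidth : Int) : Prop := 0 < mapWidth
instance (byteString : String) (mapWidth : Int) : Decidable (Pre_convertToMapPic byteString mapWidth) := by
  unfold Pre_convertToMapPic; infer_instance
def pvWitness_convertToMapPic : String × Int := ("ab", 1)

def Spec_convertToMapPic (byteString : String) (mapWidth : Int) (out : List String) : Prop := out = convertToMapPic_alt byteString mapWidth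
instance (byteString : String) (mapWidth : Int) (out : List String) : Decidable (Spec_convertToMapPic byteString mapWidth out) := by unfold Spec_convertToMapPic; infer_instance

-- ===== CLAIM (what is proved, stated in full; the proofs are below) =====
def Claim_equal_convertToMapPic : Prop := ∀ (byteString : String) (mapWidth : Int), Dom_convertToMapPic byteString mapWidth → Pre_convertToMapPic byteString mapWidth → Spec_convertToMapPic byteString mapWidth (convertToMapPic byteString mapWidth)

-- ===== LEMMAS AND PROOFS =====

-- str(ord c) for every character of cs, concatenated.
def pvRender (cs : List Char) : List Char :=
  (cs.map (fun c => PySem.Int.toChars ((c.toNat : Int)))).flatten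

-- Common reference: consume cs one char at a time; `need` chars are still missing in the current row.
def pvChunk (w : Nat) : List Char → Nat → List Char → List String
  | _, _, [] => []
  | line, need, c :: cs =>
      let line' := line ++ PySem.Int.toChars ((c.toNat : Int))
      if need = 1 then String.ofList line' :: pvChunk w [] w cs
      else pvChunk w line' (need - 1) cs

theorem pvMod_succ_dvd (w k : Nat) (hw : 0 < w) (h : w ∣ (k + 1)) : k % w = w - 1 := by
  have hr : k % w < w := Nat.mod_lt _ hw
  have h0 : (k + 1) % w = 0 := Nat.mod_eq_zero_of_dvd h
  rcases Nat.lt_or_ge 1 w with h1 | h1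
  · have key : (k + 1) % w = (k % w + 1) % w := by
      conv_lhs => rw [Nat.add_mod]
      rw [Nat.mod_eq_of_lt h1]
    by_cases hlt : k % w + 1 < w
    · rw [key, Nat.mod_eq_of_lt hlt] at h0; omega
    · omega
  · omega

theorem pvMod_succ_not (w k : Nat) (hw : 0 < w) (h : ¬ w ∣ (k + 1)) :
    (k + 1) % w = k % w + 1 ∧ k % w + 1 < w := by
  have hr : k % w < w := Nat.mod_lt _ hw
  have h1 : 1 < w := by
    by_contra hc
    have hw1 : w = 1 := by omega
    exact h (by rw [hw1]; exact Nat.one_dvd _)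
  have key : (k + 1) % w = (k % w + 1) % w := by
    conv_lhs => rw [Nat.add_mod]
    rw [Nat.mod_eq_of_lt h1]
  by_cases hlt : k % w + 1 < w
  · exact ⟨by rw [key, Nat.mod_eq_of_lt hlt], hlt⟩
  · exfalso
    have heq : k % w + 1 = w := by omega
    exact h (Nat.dvd_of_mod_eq_zero (by rw [key, heq, Nat.mod_self]))

-- A's fold, started at index k with accumulator (acc, line), appends pvChunk's rows to acc.
theorem pvA_inv (mapWidth : Int) (hmw : mapWidth ≠ 0) (cs : List Char) :
    ∀ (k : Nat) (acc : List String) (line : List Char),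
      ((PySem.List.enumerate cs (k : Int)).foldl
          (fun (st : List String × List Char) (p : Int × Char) =>
            let line := st.2 ++ PySem.Int.toChars ((p.2.toNat : Int))
            if PySem.Int.mod? (p.1 + 1) mapWidth = some 0 then (st.1 ++ [String.ofList line], [])
            else (st.1, line))
          (acc, line)).1
        = acc ++ pvChunk mapWidth.natAbs line (mapWidth.natAbs - k % mapWidth.natAbs) cs := by
  have hw : 0 < mapWidth.natAbs := Int.natAbs_pos.mpr hmw
  induction cs with
  | nil => intro k acc line; simp [PySem.List.enumerate, pvChunk]
  | cons c cs ih =>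
    intro k acc line
    rw [PySem.List.enumerate_cons, List.foldl_cons]
    have hcond : (PySem.Int.mod? ((k : Int) + 1) mapWidth = some 0) ↔ mapWidth.natAbs ∣ (k + 1) := by
      rw [PySem.Int.mod?_eq_some_zero_iff_dvd hmw]
      constructor
      · intro h
        have : (mapWidth.natAbs : Int) ∣ ((k + 1 : Nat) : Int) := by
          rw [Int.natAbs_dvd]; push_cast; exact_mod_cast h
        exact_mod_cast this
      · intro h
        have h' : (mapWidth.natAbs : Int) ∣ ((k + 1 : Nat) : Int) := by exact_mod_cast h
        rw [Int.natAbs_dvd] at h'; push_cast at h'; exact_mod_cast h'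
    set w := mapWidth.natAbs with hwdef
    have hk1 : ((k : Int) + 1) = ((k + 1 : Nat) : Int) := by push_cast; ring
    by_cases hdvd : w ∣ (k + 1)
    · have hk : k % w = w - 1 := pvMod_succ_dvd w k hw hdvd
      simp only [if_pos (hcond.mpr hdvd)]
      rw [hk1, ih (k + 1)]
      have h0 : (k + 1) % w = 0 := Nat.mod_eq_zero_of_dvd hdvd
      rw [h0, hk]
      have hneed : w - (w - 1) = 1 := by omega
      rw [hneed]
      simp [pvChunk]
    · obtain ⟨hmod, hlt⟩ := pvMod_succ_not w k hw hdvd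
      simp only [if_neg (fun h => hdvd (hcond.mp h))]
      rw [hk1, ih (k + 1)]
      rw [hmod]
      have hne : w - k % w ≠ 1 := by omega
      have hsub : w - (k % w + 1) = (w - k % w) - 1 := by omega
      rw [hsub]
      conv_rhs => rw [pvChunk, if_neg hne]

theorem pvRender_cons' (c : Char) (cs : List Char) :
    pvRender (c :: cs) = PySem.Int.toChars ((c.toNat : Int)) ++ pvRender cs := by
  simp [pvRender]

-- Consuming one full row of pvChunk at a time.
theorem pvChunk_consume (w : Nat) (cs : List Char) :
    ∀ (line : List Char) (need : Nat), 0 < need →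
      pvChunk w line need cs =
        if need ≤ cs.length then
          String.ofList (line ++ pvRender (cs.take need)) :: pvChunk w [] w (cs.drop need)
        else [] := by
  induction cs with
  | nil =>
    intro line need hneed
    rw [pvChunk]
    rw [if_neg (by simp; omega)]
  | cons c cs ih =>
    intro line need hneed
    by_cases h1 : need = 1
    · subst h1
      rw [pvChunk, if_pos rfl, if_pos (by simp)]
      simp [pvRender]
    · obtain ⟨m, rfl⟩ : ∃ m, need = m + 1 := ⟨need - 1, by omega⟩
      rw [pvChunk, if_neg h1]
      simp only [Nat.add_sub_cancel]
      rw [ih _ m (by omega)]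
      rw [List.take_succ_cons, List.drop_succ_cons, pvRender_cons']
      by_cases hle : m ≤ cs.length
      · rw [if_pos hle, if_pos (by simp; omega)]
        simp
      · rw [if_neg hle, if_neg (by simp; omega)]

-- pvChunk from a fresh row equals B's indexed-chunks formula.
theorem pvChunk_eq_rows (w : Nat) (hw : 0 < w) (cs : List Char) :
    pvChunk w [] w cs =
      (List.range (cs.length / w)).map
        (fun i => String.ofList (pvRender ((cs.drop (i * w)).take w))) := by
  by_cases hle : w ≤ cs.length
  · rw [pvChunk_consume w cs [] w hw, if_pos hle]
    have ih := pvChunk_eq_rows w hw (cs.drop w)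
    rw [ih, List.length_drop]
    rw [Nat.div_eq_sub_div hw hle, List.range_succ_eq_map]
    simp only [List.map_cons, List.map_map, List.nil_append]
    congr 1
    · simp
    · apply List.map_congr_left
      intro i _
      simp only [Function.comp_apply, List.drop_drop]
      have hidx : w + i * w = (i + 1) * w := by ring
      rw [hidx]
  · rw [pvChunk_consume w cs [] w hw, if_neg hle,
      Nat.div_eq_of_lt (by omega), List.range_zero, List.map_nil]
termination_by cs.length
decreasing_by simp; omega

-- ''.join over lists of chars is concatenation.
theorem pvJoin_nil (l : List (List Char)) : PySem.Chars.join [] l = l.flatten := by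
  induction l with
  | nil => rfl
  | cons x xs ih =>
    cases xs with
    | nil => simp [PySem.Chars.join, List.intercalate]
    | cons y ys =>
      simp [PySem.Chars.join, List.intercalate, List.intersperse] at *
      simpa [List.intercalate, List.intersperse] using ih

-- ===== VERDICT (by name: the statement is the Claim_ definition above) =====
theorem convertToMapPic_spec : Claim_equal_convertToMapPic := by
  intro s mapWidth _ hpre
  unfold Pre_convertToMapPic at hpre
  unfold Spec_convertToMapPic convertToMapPic convertToMapPic_alt
  have hmw : mapWidth ≠ 0 := by omega
  obtain ⟨W, rfl⟩ : ∃ W : Nat, mapWidth = (W : Int) := ⟨mapWidth.toNat, by omega⟩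
  have hW : 0 < W := by exact_mod_cast hpre
  have hA := pvA_inv (W : Int) hmw s.toList 0 [] []
  simp only [Nat.cast_zero, Nat.zero_mod, Nat.sub_zero, Int.natAbs_natCast] at hA
  rw [hA, pvChunk_eq_rows W hW s.toList]
  simp only [List.nil_append]
  rw [PySem.Int.floordiv_natCast, PySem.List.pyRange_zero_nat, List.map_map]
  apply List.map_congr_left
  intro i _
  simp only [Function.comp_apply]
  congr 1
  rw [pvJoin_nil]
  have hslice : PySem.List.slice s.toList (some ((i : Int) * (W : Int)))
      (some (((i : Int) + 1) * (W : Int)))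
      = (s.toList.drop (i * W)).take W := by
    have h1 : (i : Int) * (W : Int) = ((i * W : Nat) : Int) := by push_cast; ring
    have h2 : ((i : Int) + 1) * (W : Int) = (((i + 1) * W : Nat) : Int) := by push_cast; ring
    rw [h1, h2, PySem.List.slice_natCast, Nat.add_mul, one_mul, Nat.add_sub_cancel_left]
  rw [hslice]
  rfl
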